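-- pv_equiv track=rewrite | github.com/DrMohamedElsherif/BildSt-App | MedMnist_synapse3D.py | calculate_practical_limits
-- ===== SOURCE A (Python) =====
-- def calculate_practical_limits(input_shape):
--     height, width = input_shape[0], input_shape[1]
--     max_conv_layers = 0
--     temp_height, temp_width = height, width
--
--     while temp_height > 2 and temp_width > 2:
--         max_conv_layers += 1
--         temp_height = (temp_height - 2) // 2
--         temp_width = (temp_width - 2) // 2
--
--     max_conv_units = min(64, height * width // 16)
--
--     return max_conv_layers, max_conv_units
-- ===== SOURCE B (Python) =====
-- def calculate_practical_limits(input_shape):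
--     height, width = input_shape[0], input_shape[1]
--     m = min(height, width)
--     max_conv_layers = ((m + 2) // 5).bit_length() if m > 2 else 0
--     max_conv_units = min(64, height * width // 16)
--     return max_conv_layers, max_conv_units
-- ===== Notes on version B (the rewrite author's own statement) =====
-- stated objective: alternative
-- what changed: Replaces the halving while-loop over both dimensions with a closed-form bit_length formula on the smaller dimension: max_conv_layers = ((min(h,w)+2)//5).bit_length() when min(h,w)>2 else 0.
import Mathlib
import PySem

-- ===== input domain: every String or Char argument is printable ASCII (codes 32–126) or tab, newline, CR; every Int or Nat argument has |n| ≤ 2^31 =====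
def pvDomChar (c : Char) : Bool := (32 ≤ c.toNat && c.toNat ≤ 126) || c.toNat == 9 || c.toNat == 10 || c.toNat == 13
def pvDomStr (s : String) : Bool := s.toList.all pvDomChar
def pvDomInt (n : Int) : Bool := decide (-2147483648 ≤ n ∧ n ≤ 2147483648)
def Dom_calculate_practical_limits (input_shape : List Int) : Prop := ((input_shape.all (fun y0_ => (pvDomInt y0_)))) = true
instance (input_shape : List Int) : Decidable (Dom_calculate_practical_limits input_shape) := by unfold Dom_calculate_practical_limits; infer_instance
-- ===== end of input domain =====

-- B replaces A's halving while-loop with a closed-form bit_length formula on min(height,width); equivalence proved for shapes of length ≥ 2 (A raises IndexError otherwise).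

-- ===== PORT A =====
-- the while loop of A: state (max_conv_layers, temp_height, temp_width)
def pvLoopA (c th tw : Int) : Int :=
  if h : th > 2 ∧ tw > 2 then
    pvLoopA (c + 1) (PySem.Int.floordiv (th - 2) 2) (PySem.Int.floordiv (tw - 2) 2)
  else c
termination_by th.toNat
decreasing_by
  rw [PySem.Int.floordiv_eq_ediv_of_pos (by omega)]
  omega

def calculate_practical_limits (input_shape : List Int) : Int × Int :=
  match PySem.List.pyGet? input_shape 0, PySem.List.pyGet? input_shape 1 with
  | some height, some width =>
      (pvLoopA 0 height width, min 64 (PySem.Int.floordiv (height * width) 16))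
  | _, _ => (0, 0)   -- unreachable under Pre_ (Python raises IndexError)

-- ===== PORT B =====
def calculate_practical_limits_alt (input_shape : List Int) : Int × Int :=
  match PySem.List.pyGet? input_shape 0 with
  | none => (0, 0)   -- unreachable under Pre_ (Python raises IndexError)
  | some height =>
    match PySem.List.pyGet? input_shape 1 with
    | none => (0, 0)   -- unreachable under Pre_ (Python raises IndexError)
    | some width =>
      let m := min height width
      let max_conv_layers : Int :=
        if m > 2 then ((PySem.Int.bitLength (PySem.Int.floordiv (m + 2) 5) : Nat) : Int) else 0
      (max_conv_layers, min 64 (PySem.Int.floordiv (height * width) 16))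

-- ===== PRECONDITION & SPEC =====
-- Python A (and B) raise IndexError on lists with fewer than 2 elements; exactly those are excluded.
def Pre_calculate_practical_limits (input_shape : List Int) : Prop := 2 ≤ input_shape.length
instance (input_shape : List Int) : Decidable (Pre_calculate_practical_limits input_shape) := by
  unfold Pre_calculate_practical_limits; infer_instance

def pvWitness_calculate_practical_limits : List Int := ([28, 28] : List Int)

def Spec_calculate_practical_limits (input_shape : List Int) (out : Int × Int) : Prop := out = calculate_practical_limits_alt input_shape
instance (input_shape : List Int) (out : Int × Int) : Decidable (Spec_calculate_practical_limits input_shape out) := by unfold Spec_calculate_practical_limits; infer_instance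

-- ===== CLAIM (what is proved, stated in full; the proofs are below) =====
def Claim_equal_calculate_practical_limits : Prop := ∀ (input_shape : List Int), Dom_calculate_practical_limits input_shape → Pre_calculate_practical_limits input_shape → Spec_calculate_practical_limits input_shape (calculate_practical_limits input_shape)

-- ===== LEMMAS AND PROOFS =====

-- closed form of the loop count, as a function of m = min th tw
def pvLayers (m : Int) : Int :=
  if m > 2 then ((PySem.Int.bitLength (PySem.Int.floordiv (m + 2) 5) : Nat) : Int) else 0

-- one halving step of the formula
theorem pvLayers_step (m : Int) (hm : m > 2) :
    pvLayers m = 1 + pvLayers (PySem.Int.floordiv (m - 2) 2) := by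
  have h2 : PySem.Int.floordiv (m - 2) 2 = (m - 2) / 2 :=
    PySem.Int.floordiv_eq_ediv_of_pos (by omega)
  have h5 : PySem.Int.floordiv (m + 2) 5 = (m + 2) / 5 :=
    PySem.Int.floordiv_eq_ediv_of_pos (by omega)
  by_cases h : m ≥ 8
  · -- recursive case: (m-2)/2 > 2 and ((m-2)/2 + 2)/5 = ((m+2)/5)/2
    have hf : (m - 2) / 2 > 2 := by omega
    have h5' : PySem.Int.floordiv ((m - 2) / 2 + 2) 5 = ((m - 2) / 2 + 2) / 5 :=
      PySem.Int.floordiv_eq_ediv_of_pos (by omega)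
    have hq : ((m - 2) / 2 + 2) / 5 = ((m + 2) / 5) / 2 := by omega
    have hqpos : 0 < (m + 2) / 5 := by omega
    have hbl := PySem.Int.bitLength_of_pos hqpos
    rw [PySem.Int.floordiv_eq_ediv_of_pos (by omega : (0:Int) < 2)] at hbl
    simp only [pvLayers, h2, h5, h5', if_pos hm, if_pos hf, hq, hbl]
    push_cast
    ring
  · -- base case 3 ≤ m ≤ 7: one layer, and (m+2)/5 = 1
    have hf : ¬ ((m - 2) / 2 > 2) := by omega
    have hq : (m + 2) / 5 = 1 := by omega
    simp only [pvLayers, h2, h5, if_pos hm, if_neg hf, hq]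
    decide

-- the minimum commutes with the halving step
theorem pvMin_step (th tw : Int) :
    min (PySem.Int.floordiv (th - 2) 2) (PySem.Int.floordiv (tw - 2) 2)
      = PySem.Int.floordiv (min th tw - 2) 2 := by
  rw [PySem.Int.floordiv_eq_ediv_of_pos (by omega : (0:Int) < 2),
      PySem.Int.floordiv_eq_ediv_of_pos (by omega : (0:Int) < 2),
      PySem.Int.floordiv_eq_ediv_of_pos (by omega : (0:Int) < 2)]
  rcases le_total th tw with h | h
  · rw [min_eq_left h, min_eq_left (by omega : (th - 2) / 2 ≤ (tw - 2) / 2)]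
  · rw [min_eq_right h, min_eq_right (by omega : (tw - 2) / 2 ≤ (th - 2) / 2)]

-- the loop computes c + pvLayers (min th tw)
theorem pvLoopA_eq (c th tw : Int) : pvLoopA c th tw = c + pvLayers (min th tw) := by
  fun_induction pvLoopA c th tw with
  | case1 c th tw h ih =>
      rw [ih, pvMin_step, pvLayers_step (min th tw) (by exact lt_min h.1 h.2)]
      ring
  | case2 c th tw h =>
      have : ¬ (min th tw > 2) := by
        rcases le_total th tw with h' | h'
        · rw [min_eq_left h']; omega
        · rw [min_eq_right h']; omega
      rw [pvLayers, if_neg this]; ring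

-- ===== VERDICT (by name: the statement is the Claim_ definition above) =====
theorem calculate_practical_limits_spec : Claim_equal_calculate_practical_limits := by
  intro input_shape _ hpre
  unfold Pre_calculate_practical_limits at hpre
  unfold Spec_calculate_practical_limits
  match input_shape, hpre with
  | a :: b :: t, _ =>
    have hpos : (0:Int) ≤ (t.length : Int) + 1 := by omega
    have h0 : PySem.List.pyGet? (a :: b :: t) 0 = some a := by
      simp [PySem.List.pyGet?, PySem.List.pyIdx?, hpos]
    have h1 : PySem.List.pyGet? (a :: b :: t) 1 = some b := by
      simp [PySem.List.pyGet?, PySem.List.pyIdx?]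
    show calculate_practical_limits (a :: b :: t) = calculate_practical_limits_alt (a :: b :: t)
    rw [calculate_practical_limits, calculate_practical_limits_alt, h0, h1]
    simp only [pvLoopA_eq, pvLayers, zero_add]
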